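-- pv_equiv track=rewrite | github.com/emy3210/eps-mac110 | ep14.py | dicio_sucessores
-- ===== SOURCE A (Python) =====
-- def dicio_sucessores(lst):
--     '''(list) -> dict
--
--     RECEBE uma lista `lst` e RETORNA um dicionário em que
--
--         - as __chaves__ são os itens que ocorrem em `lst` e
--         - o  __valor__ associado a cada chave é a lista dos
--           itens que ocorrem imediatamente após a chave na
--           lista `lst`.
--
--     Por convenção a lista correspondente ao valor do último item
--     na lst (=lst[-1]) deve conter o primeiro item da lista (=lst[0]).
--
--     Se a lista é vazia a função deve retornar o dicionário vazio.
--     '''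
--     # modifique o código abaixo para conter a sua solução.
--     dicio={}
--     x=len(lst)
--     for i in range(x):
--         chave=lst[i]
--         s=sucessores(chave,lst)
--         if chave not in dicio:
--             dicio[chave]=s
--     return dicio
--
-- def sucessores(texto,lista):
--     sucessores=[]
--     for i in range(len(lista)):
--         if i!=len(lista)-1:
--             if texto==lista[i]:
--                 sucessores+=[lista[i+1]]
--         else:
--             if texto==lista[i]:
--                 sucessores+=[lista[0]]
--
--     return sucessores
-- ===== SOURCE B (Python) =====
-- def dicio_sucessores(lst):
--     d = {}
--     for x, y in zip(lst, lst[1:] + lst[:1]):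
--         d.setdefault(x, []).append(y)
--     return d
-- ===== Notes on version B (the rewrite author's own statement) =====
-- stated objective: faster
-- what changed: Replaced the quadratic per-key rescan (calling sucessores, a full scan of lst, for every position) with one linear pass that zips each element with its cyclic successor and appends via dict.setdefault.
import Mathlib
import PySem

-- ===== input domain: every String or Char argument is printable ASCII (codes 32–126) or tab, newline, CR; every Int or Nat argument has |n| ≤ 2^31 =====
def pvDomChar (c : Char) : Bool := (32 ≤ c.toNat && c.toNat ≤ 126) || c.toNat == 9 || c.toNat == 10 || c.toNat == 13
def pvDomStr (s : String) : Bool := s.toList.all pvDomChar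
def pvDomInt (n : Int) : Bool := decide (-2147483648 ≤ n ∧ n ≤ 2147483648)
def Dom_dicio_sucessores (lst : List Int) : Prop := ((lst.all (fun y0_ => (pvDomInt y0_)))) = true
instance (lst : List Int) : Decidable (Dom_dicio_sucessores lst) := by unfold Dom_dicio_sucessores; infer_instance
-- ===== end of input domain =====

-- B replaces A's per-key rescans of the whole list (helper 'sucessores' called at every
-- position) by one pass over the list zipped with its cyclic rotation, appending via
-- setdefault (objective: faster).

-- ===== PORT A =====
-- port of A's helper 'sucessores'
def sucessoresFn (texto : Int) (lista : List Int) : List Int :=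
  (PySem.List.pyRange 0 (PySem.List.len lista) 1).foldl
    (fun sucs i =>
      if i ≠ PySem.List.len lista - 1 then
        (if texto = PySem.List.pyGetD lista i 0 then sucs ++ [PySem.List.pyGetD lista (i + 1) 0] else sucs)
      else
        (if texto = PySem.List.pyGetD lista i 0 then sucs ++ [PySem.List.pyGetD lista 0 0] else sucs))
    []

def dicio_sucessores (lst : List Int) : List (Int × List Int) :=
  ((PySem.List.pyRange 0 (PySem.List.len lst) 1).foldl
    (fun dicio i =>
      let chave := PySem.List.pyGetD lst i 0
      let s := sucessoresFn chave lst
      if dicio.contains chave then dicio else dicio.insert chave s)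
    PySem.Dict.empty).items

-- ===== PORT B =====
def dicio_sucessores_alt (lst : List Int) : List (Int × List Int) :=
  ((lst.zip (PySem.List.slice lst (some 1) none ++ PySem.List.slice lst none (some 1))).foldl
      (fun d p => d.modify p.1 [] (fun v => v ++ [p.2])) PySem.Dict.empty).items

-- ===== PRECONDITION & SPEC =====
def Spec_dicio_sucessores (lst : List Int) (out : List (Int × List Int)) : Prop := out = dicio_sucessores_alt lst
instance (lst : List Int) (out : List (Int × List Int)) : Decidable (Spec_dicio_sucessores lst out) := by unfold Spec_dicio_sucessores; infer_instance

-- ===== CLAIM (what is proved, stated in full; the proofs are below) =====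
def Claim_equal_dicio_sucessores : Prop := ∀ (lst : List Int), Dom_dicio_sucessores lst → Spec_dicio_sucessores lst (dicio_sucessores lst)

-- ===== LEMMAS AND PROOFS =====

-- the rotated list in B is drop 1 ++ take 1
theorem pv_slices (lst : List Int) :
    PySem.List.slice lst (some 1) none ++ PySem.List.slice lst none (some 1)
      = lst.drop 1 ++ lst.take 1 := by
  have h1 : PySem.List.slice lst (some ((1 : Nat) : Int)) none = lst.drop 1 :=
    PySem.List.slice_from_natCast lst 1
  have h2 : PySem.List.slice lst none (some ((1 : Nat) : Int)) = lst.take 1 :=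
    PySem.List.slice_to_natCast lst 1
  simpa using congrArg₂ (· ++ ·) h1 h2

theorem pv_pairs_length (lst : List Int) :
    (lst.zip (lst.drop 1 ++ lst.take 1)).length = lst.length := by
  cases lst with
  | nil => simp
  | cons a t => simp [List.length_zip]

theorem pv_pairs_fst (lst : List Int) :
    (lst.zip (lst.drop 1 ++ lst.take 1)).map Prod.fst = lst := by
  refine List.map_fst_zip ?_
  cases lst <;> simp

-- the pair at index j of the zipped rotation
theorem pv_pairs_getElem (lst : List Int) (j : Nat) (hj : j < lst.length) :
    ∃ (h : j < (lst.zip (lst.drop 1 ++ lst.take 1)).length),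
      (lst.zip (lst.drop 1 ++ lst.take 1))[j]
        = (lst[j], if hl : j = lst.length - 1 then lst[0]'(by omega) else lst[j + 1]'(by omega)) := by
  refine ⟨by rw [pv_pairs_length]; exact hj, ?_⟩
  rw [List.getElem_zip]
  congr 1
  by_cases hlast : j = lst.length - 1
  · rw [List.getElem_append_right (by simp; omega)]
    simp only [List.length_drop]
    have h0 : j - (lst.length - 1) = 0 := by omega
    simp [hlast, List.getElem_take]
  · rw [List.getElem_append_left (by simp; omega)]
    rw [List.getElem_drop]
    simp only [hlast]
    congr 1
    omega

-- A's helper computes exactly the second components of the matching pairs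
theorem pv_sucessores_eq (k : Int) (lst : List Int) :
    sucessoresFn k lst
      = ((lst.zip (lst.drop 1 ++ lst.take 1)).filter (fun p => p.1 == k)).map Prod.snd := by
  unfold sucessoresFn
  have hpl : (lst.zip (lst.drop 1 ++ lst.take 1)).length = lst.length := pv_pairs_length lst
  set pairs := lst.zip (lst.drop 1 ++ lst.take 1) with hpairs
  have hlen : (PySem.List.len lst) = (PySem.List.len pairs) := by
    simp only [PySem.List.len_eq, hpl]
  rw [hlen]
  rw [PySem.List.foldl_congr_mem (PySem.List.pyRange 0 (PySem.List.len pairs) 1)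
      _ (fun acc j => (fun acc (p : Int × Int) => if p.1 == k then acc ++ [p.2] else acc) acc
            (PySem.List.pyGetD pairs j (0, 0))) [] ?_]
  · rw [PySem.List.foldl_pyRange_zero_pyGetD pairs (0, 0)
        (fun acc p => if p.1 == k then acc ++ [p.2] else acc) []]
    simpa using PySem.List.foldl_append_if (fun p : Int × Int => p.1 == k) Prod.snd pairs []
  · intro acc i hi
    rw [PySem.List.mem_pyRange_one] at hi
    simp only [PySem.List.len_eq, hpl] at hi
    obtain ⟨hi0, hin⟩ := hi
    have hj : i.toNat < lst.length := by omega
    obtain ⟨hjl, hget⟩ := pv_pairs_getElem lst i.toNat hj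
    have hpg : PySem.List.pyGetD pairs i (0, 0) = pairs[i.toNat]'hjl :=
      PySem.List.pyGetD_eq_getElem pairs (0, 0) hi0 (by rw [hpl]; exact_mod_cast hin)
    have h0 : PySem.List.pyGetD lst i 0 = lst[i.toNat]'hj :=
      PySem.List.pyGetD_eq_getElem lst 0 hi0 (by exact_mod_cast hin)
    beta_reduce
    rw [hpg, hget, h0]
    simp only [PySem.List.len_eq, hpl]
    by_cases hlast : i = (lst.length : Int) - 1
    · have hjn : i.toNat = lst.length - 1 := by omega
      have h1 : PySem.List.pyGetD lst 0 0 = lst[0]'(by omega) := by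
        have := PySem.List.pyGetD_eq_getElem lst (i := 0) 0 (by omega) (by exact_mod_cast (by omega : (0:Int) < lst.length))
        simpa using this
      rw [if_neg (not_not_intro hlast), dif_pos hjn, h1]
      by_cases hk : k = lst[i.toNat]'hj
      · simp [hk]
      · simp [hk, Ne.symm hk]
    · have hjn : i.toNat ≠ lst.length - 1 := by omega
      have h1 : PySem.List.pyGetD lst (i + 1) 0 = lst[i.toNat + 1]'(by omega) := by
        have := PySem.List.pyGetD_eq_getElem lst (i := i + 1) 0 (by omega) (by exact_mod_cast (by omega : i + 1 < (lst.length : Int)))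
        rw [this]; congr 1; omega
      rw [if_pos hlast, dif_neg hjn, h1]
      by_cases hk : k = lst[i.toNat]'hj
      · simp [hk]
      · simp [hk, Ne.symm hk]

-- A's dedup-by-membership dict loop, in canonical form
theorem pv_A_items (F : Int → List Int) (d : PySem.Dict Int (List Int)) (xs : List Int) :
    (xs.foldl (fun d x => if d.contains x then d else d.insert x (F x)) d).items
      = d.items ++ ((PySem.Set.ofList xs).filter (fun y => !(d.contains y))).map (fun k => (k, F k)) := by
  induction xs using List.reverseRecOn with
  | nil => simp [PySem.Set.ofList_nil]
  | append_singleton xs x ih =>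
    rw [List.foldl_append]
    simp only [List.foldl_cons, List.foldl_nil]
    set D := xs.foldl (fun d x => if d.contains x then d else d.insert x (F x)) d with hD
    have hkeys : D.keys = d.keys ++ ((PySem.Set.ofList xs).filter (fun y => !(d.contains y))) := by
      have h := congrArg (List.map Prod.fst) ih
      simpa [PySem.Dict.keys, List.map_map, Function.comp_def] using h
    have hdc : ∀ y, d.contains y = decide (y ∈ d.keys) := fun y =>
      PySem.Dict.contains_eq_decide_mem_keys d y
    have hDc : D.contains x = decide (x ∈ D.keys) := PySem.Dict.contains_eq_decide_mem_keys D x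
    rw [PySem.Set.ofList_append_singleton]
    by_cases hmem : x ∈ PySem.Set.ofList xs
    · rw [PySem.Set.add_of_mem hmem]
      have hDcx : D.contains x = true := by
        rw [hDc, hkeys]; simp only [List.mem_append, decide_eq_true_iff]
        cases hfx : d.contains x with
        | true => left; rw [hdc] at hfx; simpa using hfx
        | false =>
          right
          exact List.mem_filter.mpr ⟨hmem, by simp [hfx]⟩
      rw [hDcx, if_pos rfl]
      exact ih
    · have hx_nf : x ∉ (PySem.Set.ofList xs).filter (fun y => !(d.contains y)) := by
        intro hxx; exact hmem (List.mem_filter.mp hxx).1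
      rw [PySem.Set.add_of_not_mem hmem, List.filter_append]
      cases hfx : d.contains x with
      | true =>
        have hDcx : D.contains x = true := by
          rw [hDc, hkeys]; simp only [List.mem_append, decide_eq_true_iff]
          left; rw [hdc] at hfx; simpa using hfx
        rw [hDcx, if_pos rfl]
        have hfin : (List.filter (fun y => !(d.contains y)) [x]) = [] := by
          simp [hfx]
        rw [hfin, List.append_nil]
        exact ih
      | false =>
        have hDcx : D.contains x = false := by
          rw [hDc, hkeys]
          simp only [List.mem_append, decide_eq_false_iff_not]
          rintro (hk | hk)
          · rw [hdc] at hfx; simp at hfx; exact hfx (by simpa using hk)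
          · exact hx_nf hk
        rw [hDcx, if_neg (by simp)]
        rw [PySem.Dict.items_insert_of_not_contains D (F x) hDcx, ih]
        simp [hfx]

-- B's single pass, in canonical form
theorem pv_B_items (lst : List Int) :
    dicio_sucessores_alt lst
      = (PySem.Set.ofList lst).map (fun k =>
          (k, ((lst.zip (lst.drop 1 ++ lst.take 1)).filter (fun p => p.1 == k)).map Prod.snd)) := by
  unfold dicio_sucessores_alt
  rw [pv_slices]
  set pairs := lst.zip (lst.drop 1 ++ lst.take 1) with hpairs
  set dB := pairs.foldl (fun d p => d.modify p.1 [] (fun v => v ++ [p.2])) PySem.Dict.empty with hdB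
  have hfold : dB = pairs.foldl
      (fun d p => d.modify (Prod.fst p) [] ((fun (_ : PySem.Dict Int (List Int)) (p : Int × Int) (v : List Int) => v ++ [p.2]) d p)) PySem.Dict.empty := rfl
  have hnd : dB.keys.Nodup := by
    rw [hfold]
    exact PySem.Dict.nodup_keys_foldl_modify_key pairs Prod.fst [] _ PySem.Dict.empty (by simp)
  have hkeys : dB.keys = PySem.Set.ofList lst := by
    rw [hfold, PySem.Dict.keys_foldl_modify_key pairs Prod.fst [] _ PySem.Dict.empty]
    rw [pv_pairs_fst]
    simpa [PySem.Dict.keys_empty] using PySem.Set.update_nil_left lst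
  rw [PySem.Dict.items_eq_map_keys dB hnd [], hkeys]
  refine List.map_congr_left ?_
  intro k hk
  have hgd : dB.getD k [] = ((pairs.filter (fun p => p.1 == k)).map (fun x => x.2)) := by
    have := PySem.Dict.getD_foldl_modify_append pairs PySem.Dict.empty k
    rw [hdB, this]
    simp [PySem.Dict.getD_empty]
  rw [hgd]

-- ===== VERDICT (by name: the statement is the Claim_ definition above) =====
theorem dicio_sucessores_spec : Claim_equal_dicio_sucessores := by
  unfold Claim_equal_dicio_sucessores Spec_dicio_sucessores
  intro lst _
  have hA : dicio_sucessores lst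
      = (lst.foldl (fun d x => if d.contains x then d else d.insert x (sucessoresFn x lst)) PySem.Dict.empty).items := by
    show ((PySem.List.pyRange 0 (PySem.List.len lst) 1).foldl
      (fun dicio i => (fun d x => if PySem.Dict.contains d x then d else d.insert x (sucessoresFn x lst)) dicio (PySem.List.pyGetD lst i 0))
      PySem.Dict.empty).items = _
    exact congrArg PySem.Dict.items
      (PySem.List.foldl_pyRange_zero_pyGetD lst 0
        (fun d x => if d.contains x then d else d.insert x (sucessoresFn x lst)) PySem.Dict.empty)
  rw [hA, pv_A_items, pv_B_items]
  have hie : (PySem.Dict.empty : PySem.Dict Int (List Int)).items = [] := rfl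
  simp only [PySem.Dict.contains_empty, Bool.not_false, List.filter_true, hie, List.nil_append]
  refine List.map_congr_left ?_
  intro k hk
  rw [pv_sucessores_eq]
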